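-- pv_equiv track=rewrite | github.com/mohammadbaghershahmir/Automations_Project_Pileh | content_automation_project/stage_ta_processor.py | _points_grouped_by_topic_in_order
-- ===== SOURCE A (Python) =====
-- from typing import Optional, Dict, List, Any, Callable, Tuple
--
-- def _points_grouped_by_topic_in_order(
--     points: List[Dict[str, Any]],
-- ) -> List[Tuple[str, List[Dict[str, Any]]]]:
--     """Stable first-seen topic grouping for fallback topic-by-topic calls."""
--     order: List[str] = []
--     buckets: Dict[str, List[Dict[str, Any]]] = {}
--     for p in points:
--         key = (p.get("topic") or "").strip() or "(بدون مبحث)"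
--         if key not in buckets:
--             order.append(key)
--             buckets[key] = []
--         buckets[key].append(p)
--     return [(k, buckets[k]) for k in order]
-- ===== SOURCE B (Python) =====
-- from typing import Optional, Dict, List, Any, Callable, Tuple
--
-- def _points_grouped_by_topic_in_order(
--     points: List[Dict[str, Any]],
-- ) -> List[Tuple[str, List[Dict[str, Any]]]]:
--     """Index-then-rescan: first collect distinct topic keys in first-seen
--     order, then build each bucket by filtering points on the recomputed key."""
--     def norm(p):
--         return (p.get("topic") or "").strip() or "(بدون مبحث)"
--     seen = set()
--     keys: List[str] = []
--     for p in points: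
--         k = norm(p)
--         if k not in seen:
--             seen.add(k)
--             keys.append(k)
--     return [(k, [p for p in points if norm(p) == k]) for k in keys]
-- ===== Notes on version B (the rewrite author's own statement) =====
-- stated objective: alternative
-- what changed: Single-pass dict-of-buckets accumulation is replaced by an index-then-rescan decomposition: one pass collects the distinct normalized topic keys in first-seen order, then each bucket is built by filtering the whole points list on its recomputed key.
import Mathlib
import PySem

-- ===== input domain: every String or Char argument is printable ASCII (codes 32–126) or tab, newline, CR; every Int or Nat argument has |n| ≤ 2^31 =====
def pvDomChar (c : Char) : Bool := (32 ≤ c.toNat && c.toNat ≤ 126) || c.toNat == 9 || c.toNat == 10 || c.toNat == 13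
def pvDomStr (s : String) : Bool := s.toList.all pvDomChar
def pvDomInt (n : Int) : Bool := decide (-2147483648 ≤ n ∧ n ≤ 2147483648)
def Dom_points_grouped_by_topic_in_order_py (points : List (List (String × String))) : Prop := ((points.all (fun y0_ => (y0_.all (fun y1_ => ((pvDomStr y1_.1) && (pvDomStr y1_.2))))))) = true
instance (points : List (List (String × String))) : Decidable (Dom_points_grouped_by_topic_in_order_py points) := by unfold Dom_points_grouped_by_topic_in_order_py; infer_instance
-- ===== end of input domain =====

-- B replaces the single-pass dict-of-buckets accumulation by an index-then-rescan
-- decomposition (collect distinct keys first, then filter per key); alternative, not faster.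

-- ===== PORT A =====
-- key = (p.get("topic") or "").strip() or "(بدون مبحث)"  (shared normalization, identical in A and B)
def pvKey (p : List (String × String)) : String :=
  let s := PySem.Str.strip (((PySem.Dict.ofList p).get? "topic").getD "")
  if s = "" then "(بدون مبحث)" else s

-- one iteration of A's loop over (order, buckets)
def pvStepA (st : List String × PySem.Dict String (List (List (String × String))))
    (p : List (String × String)) :
    List String × PySem.Dict String (List (List (String × String))) :=
  let key := pvKey p
  let st' := if st.2.contains key then st else (st.1 ++ [key], st.2.insert key [])
  (st'.1, st'.2.modify key [] (· ++ [p]))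

-- the final comprehension [(k, buckets[k]) for k in order]; k is always present, so getD's default is never used
def pvFinalA (r : List String × PySem.Dict String (List (List (String × String)))) :
    List (String × (List (List (String × String)))) :=
  r.1.map (fun k => (k, r.2.getD k []))

def points_grouped_by_topic_in_order_py (points : List (List (String × String))) :
    List (String × (List (List (String × String)))) :=
  pvFinalA (points.foldl pvStepA ([], PySem.Dict.empty))

-- ===== PORT B =====
-- one iteration of B's key-collection loop over (seen, keys)
def pvStepB (st : PySem.Set String × List String) (p : List (String × String)) :
    PySem.Set String × List String :=
  let k := pvKey p
  if PySem.Set.contains st.1 k then st else (PySem.Set.add st.1 k, st.2 ++ [k])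

def points_grouped_by_topic_in_order_py_alt (points : List (List (String × String))) :
    List (String × (List (List (String × String)))) :=
  ((points.foldl pvStepB (PySem.Set.empty, [])).2).map
    (fun k => (k, points.filter (fun p => pvKey p == k)))

-- ===== PRECONDITION & SPEC =====
def Spec_points_grouped_by_topic_in_order_py (points : List (List (String × String))) (out : List (String × (List (List (String × String))))) : Prop := out = points_grouped_by_topic_in_order_py_alt points
instance (points : List (List (String × String))) (out : List (String × (List (List (String × String))))) : Decidable (Spec_points_grouped_by_topic_in_order_py points out) := by unfold Spec_points_grouped_by_topic_in_order_py; infer_instance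

-- ===== CLAIM (what is proved, stated in full; the proofs are below) =====
def Claim_equal_points_grouped_by_topic_in_order_py : Prop := ∀ (points : List (List (String × String))), Dom_points_grouped_by_topic_in_order_py points → Spec_points_grouped_by_topic_in_order_py points (points_grouped_by_topic_in_order_py points)

-- ===== LEMMAS AND PROOFS =====

-- A's loop: the order list tracks exactly the dict's keys, and each bucket is the
-- filter of the processed points by its key.
theorem pvA_loop (xs : List (List (String × String))) :
    ∀ (order : List String) (b : PySem.Dict String (List (List (String × String)))),
    order = b.keys → b.keys.Nodup →
    (xs.foldl pvStepA (order, b)).1 = PySem.Set.update order (xs.map pvKey) ∧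
    ∀ k, (xs.foldl pvStepA (order, b)).2.getD k [] =
          b.getD k [] ++ xs.filter (fun p => pvKey p == k) := by
  induction xs with
  | nil => intro order b ho hnd; simp [PySem.Set.update]
  | cons x xs ih =>
    intro order b ho hnd
    simp only [List.foldl_cons, List.map_cons, List.filter_cons]
    by_cases hc : b.contains (pvKey x) = true
    · have hstep : pvStepA (order, b) x = (order, b.modify (pvKey x) [] (· ++ [x])) := by
        simp [pvStepA, hc]
      rw [hstep]
      have hkeys : (b.modify (pvKey x) [] (· ++ [x])).keys = b.keys :=
        (PySem.Dict.keys_modify b (pvKey x) [] _).trans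
          (PySem.Dict.keys_insert_of_contains b _ hc)
      obtain ⟨h1, h2⟩ := ih order (b.modify (pvKey x) [] (· ++ [x]))
        (by rw [hkeys]; exact ho) (by rw [hkeys]; exact hnd)
      constructor
      · rw [h1]
        have : PySem.Set.add order (pvKey x) = order := by
          have hmem : pvKey x ∈ order := by
            rw [ho]; exact (PySem.Dict.contains_iff_mem_keys b (pvKey x)).mp hc
          simp [PySem.Set.add, PySem.Set.contains, hmem]
        simp [PySem.Set.update, this]
      · intro k
        rw [h2 k, PySem.Dict.getD_modify]
        by_cases hk : k = pvKey x
        · subst hk; simp [List.append_assoc]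
        · have : (pvKey x == k) = false := by
            simp only [beq_eq_false_iff_ne, ne_eq]; exact fun h => hk h.symm
          simp [hk, this]
    · have hstep : pvStepA (order, b) x =
          (order ++ [pvKey x], (b.insert (pvKey x) []).modify (pvKey x) [] (· ++ [x])) := by
        simp [pvStepA, hc]
      rw [hstep]
      have hcf : b.contains (pvKey x) = false := by
        cases h : b.contains (pvKey x) with
        | false => rfl
        | true => exact absurd h hc
      have hkeys : ((b.insert (pvKey x) []).modify (pvKey x) [] (· ++ [x])).keys
          = b.keys ++ [pvKey x] := by
        rw [PySem.Dict.keys_modify,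
          PySem.Dict.keys_insert_of_contains _ _ (PySem.Dict.contains_insert_self b _ _),
          PySem.Dict.keys_insert_of_not_contains b _ hcf]
      have hnotmem : pvKey x ∉ b.keys := fun h =>
        hc ((PySem.Dict.contains_iff_mem_keys b (pvKey x)).mpr h)
      obtain ⟨h1, h2⟩ := ih (order ++ [pvKey x]) _
        (by rw [hkeys, ho]) (by rw [hkeys]; simp [List.Nodup.append, hnd, hnotmem])
      constructor
      · rw [h1]
        have : PySem.Set.add order (pvKey x) = order ++ [pvKey x] := by
          have hmem : pvKey x ∉ order := by rw [ho]; exact hnotmem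
          simp [PySem.Set.add, PySem.Set.contains, hmem]
        simp [PySem.Set.update, this]
      · intro k
        rw [h2 k, PySem.Dict.getD_modify, PySem.Dict.getD_insert]
        by_cases hk : k = pvKey x
        · subst hk
          simp [PySem.Dict.getD_of_not_contains b _ hcf]
        · have : (pvKey x == k) = false := by
            simp only [beq_eq_false_iff_ne, ne_eq]; exact fun h => hk h.symm
          simp only [hk, if_false, this, Bool.false_eq_true]
          rw [PySem.Dict.getD_insert]
          simp [hk]

-- B's key-collection loop: seen and keys stay equal, and both fold as Set.add.
theorem pvB_loop (xs : List (List (String × String))) :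
    ∀ (s : List String),
    xs.foldl pvStepB (s, s) =
      (PySem.Set.update s (xs.map pvKey), PySem.Set.update s (xs.map pvKey)) := by
  induction xs with
  | nil => intro s; simp [PySem.Set.update]
  | cons x xs ih =>
    intro s
    simp only [List.foldl_cons, List.map_cons]
    have hstep : pvStepB (s, s) x = (PySem.Set.add s (pvKey x), PySem.Set.add s (pvKey x)) := by
      by_cases hm : pvKey x ∈ s
      · simp [pvStepB, PySem.Set.add, PySem.Set.contains, hm]
      · simp [pvStepB, PySem.Set.add, PySem.Set.contains, hm]
    rw [hstep, ih (PySem.Set.add s (pvKey x))]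
    simp [PySem.Set.update]

-- ===== VERDICT (by name: the statement is the Claim_ definition above) =====
theorem points_grouped_by_topic_in_order_py_spec : Claim_equal_points_grouped_by_topic_in_order_py := by
  intro points _
  unfold Spec_points_grouped_by_topic_in_order_py
  unfold points_grouped_by_topic_in_order_py points_grouped_by_topic_in_order_py_alt pvFinalA
  obtain ⟨h1, h2⟩ := pvA_loop points [] PySem.Dict.empty (by simp [PySem.Dict.keys_empty])
    (by simp [PySem.Dict.keys_empty])
  have hb := pvB_loop points []
  rw [h1, show (PySem.Set.empty : PySem.Set String) = [] from rfl, hb]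
  apply List.map_congr_left
  intro k _
  rw [h2 k]
  simp [PySem.Dict.getD_empty]
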